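-- pv_equiv track=rewrite | github.com/ViniciusHenriqueB/Estrutura-de-Dados | questionarios/pilha_e_fila/q01.py | filacetamol
-- ===== SOURCE A (Python) =====
-- class Queue:
--     def __init__(self):
--         self.items = []
--
--     def isEmpty(self):
--         return self.items == []
--
--     def enqueue(self, item):
--         self.items.insert(0,item)
--
--     def dequeue(self):
--         return self.items.pop()
--
--     def size(self):
--         return len(self.items)
--
-- def filacetamol(string):
--     fila =  Queue()
--     saida = ''
--     for caractere in string:
--         if caractere == '*' and not fila.isEmpty():
--             saida += fila.dequeue()
--         else:
--             fila.enqueue(caractere)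
--
--     return saida
-- ===== SOURCE B (Python) =====
-- def filacetamol(string):
--     enq = []
--     deq = 0
--     size = 0
--     for caractere in string:
--         if caractere == '*' and size > 0:
--             deq += 1
--             size -= 1
--         else:
--             enq.append(caractere)
--             size += 1
--     return ''.join(enq[:deq])
-- ===== Notes on version B (the rewrite author's own statement) =====
-- stated objective: faster
-- what changed: Drops the Queue class: one pass records every enqueued char in an append-only list and counts dequeues; FIFO output order equals enqueue order, so the result is the prefix enq[:deq] joined once, instead of insert(0,...)/pop() plus repeated string concatenation.
import Mathlib
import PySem

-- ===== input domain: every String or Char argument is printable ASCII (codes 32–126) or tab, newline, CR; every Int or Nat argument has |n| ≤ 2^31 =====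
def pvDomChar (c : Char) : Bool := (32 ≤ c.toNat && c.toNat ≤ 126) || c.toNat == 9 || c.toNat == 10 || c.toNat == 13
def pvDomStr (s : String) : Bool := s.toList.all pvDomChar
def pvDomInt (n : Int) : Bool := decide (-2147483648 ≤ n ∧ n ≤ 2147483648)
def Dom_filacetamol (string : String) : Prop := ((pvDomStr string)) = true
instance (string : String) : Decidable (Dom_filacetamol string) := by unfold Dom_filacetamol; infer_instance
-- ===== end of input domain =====

-- B replaces A's Queue (insert-at-front / pop-last, plus repeated string concatenation) by one
-- pass over the string with an append-only list of enqueued chars and a dequeue counter,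
-- returning the prefix of the enqueue log; asymptotically faster (O(n) vs O(n^2)).

-- ===== PORT A =====
-- the for-loop of A: state is (fila.items, saida); enqueue = insert(0, c), dequeue = pop() (last)
def filacetamolGo : List Char → List Char → List Char → List Char
  | [], _fila, saida => saida
  | c :: rest, fila, saida =>
    if c = '*' ∧ fila ≠ [] then
      filacetamolGo rest fila.dropLast (saida ++ [fila.getLastD ' '])
    else
      filacetamolGo rest (c :: fila) saida

def filacetamol (string : String) : String :=
  String.ofList (filacetamolGo string.toList [] [])

-- ===== PORT B =====
-- the for-loop of B: state is (enq, deq, size); '*' with size>0 counts a dequeue, else appends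
def filacetamolAltGo : List Char → List Char → Nat → Nat → List Char × Nat
  | [], enq, deq, _size => (enq, deq)
  | c :: rest, enq, deq, size =>
    if c = '*' ∧ size > 0 then
      filacetamolAltGo rest enq (deq + 1) (size - 1)
    else
      filacetamolAltGo rest (enq ++ [c]) deq (size + 1)

def filacetamol_alt (string : String) : String :=
  let r := filacetamolAltGo string.toList [] 0 0
  String.ofList (r.1.take r.2)

-- ===== PRECONDITION & SPEC =====
def Spec_filacetamol (string : String) (out : String) : Prop := out = filacetamol_alt string
instance (string : String) (out : String) : Decidable (Spec_filacetamol string out) := by unfold Spec_filacetamol; infer_instance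

-- ===== CLAIM (what is proved, stated in full; the proofs are below) =====
def Claim_equal_filacetamol : Prop := ∀ (string : String), Dom_filacetamol string → Spec_filacetamol string (filacetamol string)

-- ===== LEMMAS AND PROOFS =====

-- Invariant: A's queue is the reversed pending suffix of B's enqueue log and A's output is its
-- dequeued prefix; B's size counter is the number of pending items.
lemma filacetamol_loop_eq (cs : List Char) : ∀ (enq : List Char) (deq : Nat), deq ≤ enq.length →
    filacetamolGo cs ((enq.drop deq).reverse) (enq.take deq)
      = (filacetamolAltGo cs enq deq (enq.length - deq)).1.take
          (filacetamolAltGo cs enq deq (enq.length - deq)).2 := by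
  induction cs with
  | nil =>
    intro enq deq h
    simp [filacetamolGo, filacetamolAltGo]
  | cons c rest ih =>
    intro enq deq h
    by_cases hc : c = '*' ∧ deq < enq.length
    · have hne : (enq.drop deq).reverse ≠ [] := by
        simp [List.drop_eq_nil_iff]; omega
      have hgl : (enq.drop deq).reverse.getLastD ' ' = enq[deq]'hc.2 := by
        rw [List.getLastD_eq_getLast?, List.getLast?_reverse, List.head?_drop,
            List.getElem?_eq_getElem hc.2]
        rfl
      have hdl : ((enq.drop deq).reverse).dropLast = (enq.drop (deq + 1)).reverse := by
        rw [List.dropLast_reverse, List.tail_drop]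
      have htk : enq.take deq ++ [enq[deq]'hc.2] = enq.take (deq + 1) := by
        rw [List.take_add_one, List.getElem?_eq_getElem hc.2]; rfl
      rw [filacetamolGo, filacetamolAltGo]
      rw [if_pos ⟨hc.1, hne⟩, if_pos ⟨hc.1, by omega⟩]
      rw [hgl, hdl, htk]
      have : enq.length - deq - 1 = enq.length - (deq + 1) := by omega
      rw [this]
      exact ih enq (deq + 1) hc.2
    · have hsz : ¬ (c = '*' ∧ enq.length - deq > 0) := by
        intro ⟨h1, h2⟩; exact hc ⟨h1, by omega⟩
      have hfe : ¬ (c = '*' ∧ (enq.drop deq).reverse ≠ []) := by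
        intro ⟨h1, h2⟩
        apply hc
        refine ⟨h1, ?_⟩
        by_contra hlt
        exact h2 (by simp [List.drop_eq_nil_iff]; omega)
      rw [filacetamolGo, filacetamolAltGo, if_neg hfe, if_neg hsz]
      have h1 : c :: (enq.drop deq).reverse = ((enq ++ [c]).drop deq).reverse := by
        rw [List.drop_append_of_le_length h]; simp
      have h2 : enq.take deq = (enq ++ [c]).take deq := by
        rw [List.take_append_of_le_length h]
      have h3 : enq.length - deq + 1 = (enq ++ [c]).length - deq := by
        simp; omega
      rw [h1, h2, h3]
      exact ih (enq ++ [c]) deq (by simp; omega)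

-- ===== VERDICT (by name: the statement is the Claim_ definition above) =====
theorem filacetamol_spec : Claim_equal_filacetamol := by
  intro s _
  show String.ofList _ = _
  unfold filacetamol_alt
  have := filacetamol_loop_eq s.toList [] 0 (by simp)
  simpa using congrArg String.ofList this
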